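-- pv_equiv track=rewrite | github.com/pypi-data/pypi-mirror-289 | packages/code-diff-review/code_diff_review-1.3.15.tar.gz/code_diff_review-1.3.15/src/publishers.py | generate_xy_diagram
-- ===== SOURCE A (Python) =====
-- from typing import List, Optional, Dict, Any
--
-- def generate_xy_diagram(data_points: List[tuple]) -> str:
--     """
--     Generates a simple XY diagram using emojis as data points.
--
--     :param data_points: A list of tuples containing commit SHAs, scores, and emojis.
--     :return: A string representing the XY diagram.
--     """
--     max_score = max(score for _, score, _ in data_points)
--     diagram = ["```\n    +---+---+---+---+---+---+---+---+---+---+---+ (Score)"]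
--     for i in range(max_score, 0, -1):
--         line = f"{str(i).rjust(2)} | " + ''.join(
--             data_point[2] if data_point[1] >= i else '   '
--             for data_point in sorted(data_points, key=lambda x: x[1])
--         )
--         diagram.append(line)
--     diagram.append("    +---+---+---+---+---+---+---+---+---+---+---+\n")
--     diagram.append("       " + "   ".join(dp[0] for dp in sorted(data_points, key=lambda x: x[1])) + " (SHA)")
--     diagram.append("```")
--     return '\n'.join(diagram)
-- ===== SOURCE B (Python) =====
-- def generate_xy_diagram(data_points):
--     """
--     Generates a simple XY diagram using emojis as data points.
--     Sorts once and keeps a running cutoff k (count of points with score < i,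
--     updated per row from a score-frequency table) instead of re-sorting and
--     re-testing every point on every row.
--     """
--     max_score = max(score for _, score, _ in data_points)
--     pts = sorted(data_points, key=lambda p: p[1])
--     emojis = [p[2] for p in pts]
--     counts = {}
--     for _, s, _ in pts:
--         counts[s] = counts.get(s, 0) + 1
--     lines = ["```\n    +---+---+---+---+---+---+---+---+---+---+---+ (Score)"]
--     k = len(pts)
--     for i in range(max_score, 0, -1):
--         k -= counts.get(i, 0)
--         lines.append(str(i).rjust(2) + " | " + '   ' * k + ''.join(emojis[k:]))
--     lines.append("    +---+---+---+---+---+---+---+---+---+---+---+\n")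
--     lines.append("       " + "   ".join(p[0] for p in pts) + " (SHA)")
--     lines.append("```")
--     return '\n'.join(lines)
-- ===== Notes on version B (the rewrite author's own statement) =====
-- stated objective: alternative
-- what changed: B sorts the points once and builds each row from a running cutoff k = #(scores below the row), updated per row from a score-frequency table, emitting k blank cells plus the emoji suffix, instead of A's re-sorting the whole list and re-testing every point for every row.
-- outside the precondition, e.g. on generate_xy_diagram([]): A raises ValueError, B raises ValueError
import Mathlib
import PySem

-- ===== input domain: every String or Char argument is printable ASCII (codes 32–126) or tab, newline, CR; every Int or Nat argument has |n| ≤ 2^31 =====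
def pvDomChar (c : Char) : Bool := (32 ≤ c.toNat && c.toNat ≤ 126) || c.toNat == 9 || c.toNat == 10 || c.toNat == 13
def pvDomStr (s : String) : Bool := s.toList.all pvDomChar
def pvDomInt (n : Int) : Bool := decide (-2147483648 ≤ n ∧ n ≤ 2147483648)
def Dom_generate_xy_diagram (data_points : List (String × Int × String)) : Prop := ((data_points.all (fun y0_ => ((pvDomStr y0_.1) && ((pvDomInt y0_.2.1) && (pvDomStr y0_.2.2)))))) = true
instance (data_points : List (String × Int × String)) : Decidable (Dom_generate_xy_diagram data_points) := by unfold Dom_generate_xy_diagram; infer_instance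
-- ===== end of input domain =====

-- B sorts the points once and builds each row from a running cutoff (count of scores below the
-- row, updated from a score-frequency table) instead of re-sorting and re-testing every point
-- per row; same return value on every nonempty input.

-- shared built-in: str.rjust(2) = ' ' * (2 - len(s)) + s (exact)
def pvRjust2 (s : String) : String :=
  String.ofList (List.replicate (2 - s.toList.length) ' ' ++ s.toList)

-- ===== PORT A =====
def generate_xy_diagram (data_points : List (String × Int × String)) : String :=
  -- max(score for _, score, _ in data_points); the ValueError on [] is excluded by Pre_
  match PySem.List.max? (data_points.map (fun p => p.2.1)) (fun s => s) with
  | none => ""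
  | some max_score =>
    let diagram : List String := ["```\n    +---+---+---+---+---+---+---+---+---+---+---+ (Score)"]
    let diagram := (PySem.List.pyRange max_score 0 (-1)).foldl
      (fun diagram i =>
        let line := PySem.Str.join ""
          [pvRjust2 (PySem.Int.toStr i), " | ",
           PySem.Str.join "" ((PySem.List.sorted data_points (fun x => x.2.1)).map
             (fun dp => if dp.2.1 ≥ i then dp.2.2 else "   "))]
        diagram ++ [line]) diagram
    let diagram := diagram ++ ["    +---+---+---+---+---+---+---+---+---+---+---+\n"]
    let diagram := diagram ++ [PySem.Str.join ""
      ["       ",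
       PySem.Str.join "   " ((PySem.List.sorted data_points (fun x => x.2.1)).map (fun dp => dp.1)),
       " (SHA)"]]
    let diagram := diagram ++ ["```"]
    PySem.Str.join "\n" diagram

-- ===== PORT B =====
def generate_xy_diagram_alt (data_points : List (String × Int × String)) : String :=
  match PySem.List.max? (data_points.map (fun p => p.2.1)) (fun s => s) with
  | none => ""
  | some max_score =>
    let pts := PySem.List.sorted data_points (fun p => p.2.1)
    let emojis := pts.map (fun p => p.2.2)
    -- counts = {}; for _, s, _ in pts: counts[s] = counts.get(s, 0) + 1
    let counts : PySem.Dict Int Int :=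
      pts.foldl (fun d p => d.insert p.2.1 (d.getD p.2.1 0 + 1)) PySem.Dict.empty
    let lines : List String := ["```\n    +---+---+---+---+---+---+---+---+---+---+---+ (Score)"]
    let st := (PySem.List.pyRange max_score 0 (-1)).foldl
      (fun (st : Int × List String) i =>
        let k := st.1 - counts.getD i 0
        (k, st.2 ++ [PySem.Str.join ""
          [pvRjust2 (PySem.Int.toStr i), " | ",
           String.ofList (PySem.List.pyRepeat "   ".toList k),            -- '   ' * k
           PySem.Str.join "" (PySem.List.slice emojis (some k) none)]]))  -- ''.join(emojis[k:])
      ((pts.length : Int), lines)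
    let lines := st.2
    let lines := lines ++ ["    +---+---+---+---+---+---+---+---+---+---+---+\n"]
    let lines := lines ++ [PySem.Str.join ""
      ["       ", PySem.Str.join "   " (pts.map (fun p => p.1)), " (SHA)"]]
    let lines := lines ++ ["```"]
    PySem.Str.join "\n" lines

-- ===== PRECONDITION & SPEC =====
-- Python's max() raises ValueError on the empty list, so A raises there; Pre_ excludes exactly [].
def Pre_generate_xy_diagram (data_points : List (String × Int × String)) : Prop :=
  data_points ≠ []
instance (data_points : List (String × Int × String)) : Decidable (Pre_generate_xy_diagram data_points) := by
  unfold Pre_generate_xy_diagram; infer_instance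

def pvWitness_generate_xy_diagram : (List (String × Int × String)) :=
  [("a1c", 2, " # "), ("b2d", 1, " * ")]

def Spec_generate_xy_diagram (data_points : List (String × Int × String)) (out : String) : Prop := out = generate_xy_diagram_alt data_points
instance (data_points : List (String × Int × String)) (out : String) : Decidable (Spec_generate_xy_diagram data_points out) := by unfold Spec_generate_xy_diagram; infer_instance

-- ===== CLAIM (what is proved, stated in full; the proofs are below) =====
def Claim_equal_generate_xy_diagram : Prop := ∀ (data_points : List (String × Int × String)), Dom_generate_xy_diagram data_points → Pre_generate_xy_diagram data_points → Spec_generate_xy_diagram data_points (generate_xy_diagram data_points)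

-- ===== LEMMAS AND PROOFS =====

-- number of points with score below i
def pvCnt (pts : List (String × Int × String)) (i : Int) : Nat :=
  pts.countP (fun p => decide (p.2.1 < i))

-- empty-separator join is flatten
theorem pvJoinNil (l : List (List Char)) : PySem.Chars.join [] l = l.flatten := by
  simp only [PySem.Chars.join, List.intercalate]
  induction l with
  | nil => rfl
  | cons a t ih =>
    cases t with
    | nil => simp
    | cons b t2 => simpa [List.intersperse] using ih

-- counting: #(score < i+1) = #(score < i) + #(score == i)
theorem pvCnt_succ (pts : List (String × Int × String)) (i : Int) :
    pvCnt pts (i + 1) = pvCnt pts i + (pts.map (fun p => p.2.1)).count i := by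
  induction pts with
  | nil => simp [pvCnt]
  | cons p t ih =>
    simp only [pvCnt, List.countP_cons, List.map_cons, List.count_cons] at ih ⊢
    rw [ih]
    split_ifs <;> simp_all <;> omega

-- on a list of points whose scores are all ≥ i, every cell shows the emoji
theorem pvCellsAllGe (i : Int) (l : List (String × Int × String))
    (h : ∀ p ∈ l, i ≤ p.2.1) :
    l.map (fun dp => if dp.2.1 ≥ i then dp.2.2.toList else ("   " : String).toList)
      = l.map (fun dp => dp.2.2.toList) := by
  apply List.map_congr_left
  intro p hp
  simp [h p hp]

-- THE ROW LEMMA: on a score-sorted list the per-cell row is k space-cells then the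
-- emojis of the suffix, where k = #(score < i)
theorem pvRow (i : Int) (l : List (String × Int × String))
    (hs : l.Pairwise (fun a b => a.2.1 ≤ b.2.1)) :
    (l.map (fun dp => if dp.2.1 ≥ i then dp.2.2.toList else ("   " : String).toList)).flatten
      = (List.replicate (pvCnt l i) ("   " : String).toList).flatten
        ++ (((l.map (fun p => p.2.2)).drop (pvCnt l i)).map String.toList).flatten := by
  induction l with
  | nil => simp [pvCnt]
  | cons p t ih =>
    rcases List.pairwise_cons.mp hs with ⟨hpt, ht⟩
    by_cases h : p.2.1 < i
    · have hcnt : pvCnt (p :: t) i = pvCnt t i + 1 := by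
        simp [pvCnt, h]
      have hge : ¬ p.2.1 ≥ i := by omega
      simp only [List.map_cons, List.flatten_cons, hcnt, List.replicate_succ,
        List.drop_succ_cons, if_neg hge]
      rw [ih ht]
      simp
    · have hall : ∀ q ∈ p :: t, i ≤ q.2.1 := by
        intro q hq
        rcases List.mem_cons.mp hq with rfl | hq
        · omega
        · exact le_trans (by omega) (hpt q hq)
      have hcnt : pvCnt (p :: t) i = 0 := by
        simp only [pvCnt, List.countP_eq_zero]
        intro q hq
        simpa using not_lt.mpr (hall q hq)
      rw [hcnt, pvCellsAllGe i (p :: t) hall]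
      simp [List.map_map]
      rfl

-- B's row loop: starting with the cutoff #(score < n+1), each iteration i stores the
-- line built with the cutoff #(score < i)
theorem pvFoldB (pts : List (String × Int × String))
    (counts : PySem.Dict Int Int)
    (hc : counts = PySem.Dict.counter (pts.map (fun p => p.2.1)))
    (mk : Int → Int → String) :
    ∀ (n : Nat) (acc : List String),
      ((PySem.List.pyRange (n : Int) 0 (-1)).foldl
        (fun (st : Int × List String) i =>
          (st.1 - counts.getD i 0, st.2 ++ [mk i (st.1 - counts.getD i 0)]))
        (((pvCnt pts ((n : Int) + 1)) : Int), acc)).2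
      = acc ++ (PySem.List.pyRange (n : Int) 0 (-1)).map
          (fun i => mk i ((pvCnt pts i : Nat) : Int)) := by
  intro n
  induction n with
  | zero =>
    intro acc
    rw [PySem.List.pyRange_neg_one_eq_nil (by norm_num)]
    simp
  | succ n ih =>
    intro acc
    have h1 : ((n + 1 : Nat) : Int) = (n : Int) + 1 := by push_cast; ring
    rw [h1, PySem.List.pyRange_neg_one_cons (by omega : (0 : Int) < (n : Int) + 1)]
    have h2 : (n : Int) + 1 - 1 = (n : Int) := by ring
    rw [h2]
    simp only [List.foldl_cons, List.map_cons]
    have hk : ((pvCnt pts ((n : Int) + 1 + 1) : Nat) : Int) - counts.getD ((n : Int) + 1) 0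
        = ((pvCnt pts ((n : Int) + 1) : Nat) : Int) := by
      rw [hc, PySem.Dict.getD_counter]
      have := pvCnt_succ pts ((n : Int) + 1)
      omega
    rw [hk, ih (acc ++ [mk ((n : Int) + 1) ((pvCnt pts ((n : Int) + 1) : Nat) : Int)])]
    simp

-- the two programs return the same string on every input
theorem pvMain (dps : List (String × Int × String)) :
    generate_xy_diagram dps = generate_xy_diagram_alt dps := by
  cases hmax : PySem.List.max? (dps.map (fun p => p.2.1)) (fun s => s) with
  | none => simp [generate_xy_diagram, generate_xy_diagram_alt, hmax]
  | some m =>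
    simp only [generate_xy_diagram, generate_xy_diagram_alt, hmax]
    have hsort : (PySem.List.sorted dps (fun x => x.2.1)).Pairwise (fun a b => a.2.1 ≤ b.2.1) :=
      PySem.List.sorted_pairwise dps _
    have hall : ∀ p ∈ PySem.List.sorted dps (fun x => x.2.1), p.2.1 ≤ m := by
      intro p hp
      have hmem : p ∈ dps := (PySem.List.mem_sorted dps (fun x => x.2.1) false p).mp hp
      exact PySem.List.max?_isMax hmax _ (List.mem_map_of_mem hmem)
    generalize hpts : PySem.List.sorted dps (fun x => x.2.1) = pts
    rw [hpts] at hsort hall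
    have hcounts : List.foldl (fun d p => d.insert p.2.1 (d.getD p.2.1 0 + 1))
        PySem.Dict.empty pts = PySem.Dict.counter (pts.map (fun p => p.2.1)) := by
      rw [← PySem.Dict.foldl_insert_getD_add_one_eq_counter, List.foldl_map]
    rw [hcounts, PySem.List.foldl_append_singleton_eq_map]
    congr 1
    congr 2
    by_cases hm : m ≤ 0
    · rw [PySem.List.pyRange_neg_one_eq_nil hm]
      simp
    · have hn : ((m.toNat : Nat) : Int) = m := Int.toNat_of_nonneg (by omega)
      have hlen : pvCnt pts ((m.toNat : Int) + 1) = pts.length := by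
        apply List.countP_eq_length.mpr
        intro p hp
        have := hall p hp
        simp only [decide_eq_true_eq]
        omega
      rw [← hn, show ((pts.length : Nat) : Int) = ((pvCnt pts (((m.toNat : Nat) : Int) + 1) : Nat) : Int) by rw [hlen]]
      have key := pvFoldB pts (PySem.Dict.counter (pts.map (fun p => p.2.1))) rfl
        (fun i k => PySem.Str.join ""
          [pvRjust2 (PySem.Int.toStr i), " | ",
           String.ofList (PySem.List.pyRepeat "   ".toList k),
           PySem.Str.join "" (PySem.List.slice (List.map (fun p => p.2.2) pts) (some k))])
        m.toNat ["```\n    +---+---+---+---+---+---+---+---+---+---+---+ (Score)"]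
      beta_reduce at key
      have key2 := congrArg (fun l => l ++ ["    +---+---+---+---+---+---+---+---+---+---+---+\n"]) key
      beta_reduce at key2
      refine Eq.trans ?_ key2.symm
      refine congrArg (fun l => (["```\n    +---+---+---+---+---+---+---+---+---+---+---+ (Score)"] ++ l) ++ ["    +---+---+---+---+---+---+---+---+---+---+---+\n"]) ?_
      apply List.map_congr_left
      intro i hi
      apply String.toList_inj.mp
      have h0 : ("" : String).toList = [] := rfl
      simp only [PySem.Str.toList_join, h0, pvJoinNil, List.map_cons, List.map_nil,
        List.flatten_cons, List.flatten_nil, List.append_nil, String.toList_ofList,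
        PySem.List.pyRepeat, List.map_map]
      simp only [PySem.List.slice_from_natCast, Int.toNat_natCast, Function.comp_def,
        apply_ite String.toList]
      rw [pvRow i pts hsort]

-- ===== VERDICT (by name: the statement is the Claim_ definition above) =====
theorem generate_xy_diagram_spec : Claim_equal_generate_xy_diagram := by
  intro dps _ _
  exact pvMain dps
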